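-- pv_equiv track=rewrite | github.com/maxHolsch/HeatMapHighlighter | backend/span_detector.py | group_above_threshold
-- ===== SOURCE A (Python) =====
-- from typing import Dict, List, Optional, Tuple
--
-- def group_above_threshold(
--     scores: List[Dict],
--     threshold: int,
--     num_snippets: int,
--     num_context: int = 1,
-- ) -> List[Dict]:
--     """
--     Group consecutive above-threshold snippets into candidate groups.
--
--     Each group contains:
--       - candidate_indices: list of original snippet indices that are above threshold
--       - context_before: up to `num_context` snippet indices immediately before
--       - context_after: up to `num_context` snippet indices immediately after
--     """
--     above = set()
--     for entry in scores:
--         score = entry.get("highlight_score", entry.get("score", 0))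
--         if score >= threshold:
--             above.add(entry["paragraph_index"])
--
--     sorted_above = sorted(above)
--     if not sorted_above:
--         return []
--
--     runs: List[List[int]] = []
--     current_run = [sorted_above[0]]
--     for idx in sorted_above[1:]:
--         if idx == current_run[-1] + 1:
--             current_run.append(idx)
--         else:
--             runs.append(current_run)
--             current_run = [idx]
--     runs.append(current_run)
--
--     groups = []
--     for run in runs:
--         first, last = run[0], run[-1]
--         ctx_before = list(range(max(0, first - num_context), first))
--         ctx_after = list(range(last + 1, min(num_snippets, last + 1 + num_context)))
--         groups.append({
--             "candidate_indices": run,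
--             "context_before": ctx_before,
--             "context_after": ctx_after,
--         })
--
--     return groups
-- ===== SOURCE B (Python) =====
-- def group_above_threshold(scores, threshold, num_snippets, num_context=1):
--     above = {
--         entry["paragraph_index"]
--         for entry in scores
--         if entry.get("highlight_score", entry.get("score", 0)) >= threshold
--     }
--     # boundary detection: a run starts where x-1 is absent, ends where x+1 is absent
--     starts = sorted(x for x in above if x - 1 not in above)
--     ends = sorted(x for x in above if x + 1 not in above)
--     return [
--         {
--             "candidate_indices": list(range(s, e + 1)),
--             "context_before": list(range(max(0, s - num_context), s)),
--             "context_after": list(range(e + 1, min(num_snippets, e + 1 + num_context))),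
--         }
--         for s, e in zip(starts, ends)
--     ]
-- ===== Notes on version B (the rewrite author's own statement) =====
-- stated objective: alternative
-- what changed: Replaces A's sequential run-accumulation over the sorted indices (carrying a current_run and comparing each index with the previous) by boundary detection: run starts are the above-threshold indices x with x-1 not in the set, run ends those with x+1 absent; zipping the sorted starts with the sorted ends yields each run as a contiguous range directly.
import Mathlib
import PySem

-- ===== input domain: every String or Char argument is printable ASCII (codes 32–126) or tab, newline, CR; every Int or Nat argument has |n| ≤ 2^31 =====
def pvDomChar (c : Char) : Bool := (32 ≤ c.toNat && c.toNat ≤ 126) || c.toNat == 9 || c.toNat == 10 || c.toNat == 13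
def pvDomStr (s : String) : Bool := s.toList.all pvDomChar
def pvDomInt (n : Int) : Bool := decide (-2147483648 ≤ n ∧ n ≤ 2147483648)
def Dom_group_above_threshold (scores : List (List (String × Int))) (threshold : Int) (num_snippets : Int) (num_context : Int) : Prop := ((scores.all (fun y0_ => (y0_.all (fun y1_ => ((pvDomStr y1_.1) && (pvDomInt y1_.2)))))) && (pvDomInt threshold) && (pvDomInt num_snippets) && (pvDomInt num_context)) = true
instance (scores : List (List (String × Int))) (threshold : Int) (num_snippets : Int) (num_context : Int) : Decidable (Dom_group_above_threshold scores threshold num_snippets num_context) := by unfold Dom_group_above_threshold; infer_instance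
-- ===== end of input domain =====

-- B replaces A's sequential run-accumulation over the sorted indices by boundary detection
-- (run starts = indices x with x-1 absent, run ends = x with x+1 absent, zipped into ranges);
-- objective: alternative decomposition, same O(n log n) cost. Equivalence of return values only.

-- ===== PORT A =====
-- entry.get("highlight_score", entry.get("score", 0))
def pvScore (e : List (String × Int)) : Int :=
  (PySem.Dict.mk e).getD "highlight_score" ((PySem.Dict.mk e).getD "score" 0)

-- entry["paragraph_index"]; Pre_ guarantees the key is present wherever this is evaluated
def pvIdx (e : List (String × Int)) : Int :=
  (PySem.Dict.mk e).getD "paragraph_index" 0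

def group_above_threshold (scores : List (List (String × Int))) (threshold : Int) (num_snippets : Int) (num_context : Int) : List (List (String × List Int)) :=
  let above : PySem.Set Int := scores.foldl
    (fun s e => if threshold ≤ pvScore e then PySem.Set.add s (pvIdx e) else s) PySem.Set.empty
  let sorted_above := PySem.List.sorted above (fun x => x)
  match sorted_above with
  | [] => []
  | h :: t =>
    let st := t.foldl
      (fun (st : List (List Int) × List Int) idx =>
        if idx == st.2.getLast! + 1 then (st.1, st.2 ++ [idx]) else (st.1 ++ [st.2], [idx]))
      (([] : List (List Int)), [h])
    let runs := st.1 ++ [st.2]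
    runs.foldl (fun gs run =>
      gs ++ [[("candidate_indices", run),
              ("context_before", PySem.List.pyRange (max 0 (run.head! - num_context)) run.head!),
              ("context_after", PySem.List.pyRange (run.getLast! + 1) (min num_snippets (run.getLast! + 1 + num_context)))]]) []

-- ===== PORT B =====
def group_above_threshold_alt (scores : List (List (String × Int))) (threshold : Int) (num_snippets : Int) (num_context : Int) : List (List (String × List Int)) :=
  let above : PySem.Set Int :=
    PySem.Set.ofList ((scores.filter (fun e => decide (threshold ≤ pvScore e))).map pvIdx)
  let starts := PySem.List.sorted (List.filter (fun x => !(PySem.Set.contains above (x - 1))) above) (fun x => x)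
  let ends := PySem.List.sorted (List.filter (fun x => !(PySem.Set.contains above (x + 1))) above) (fun x => x)
  (starts.zip ends).map (fun se =>
    [("candidate_indices", PySem.List.pyRange se.1 (se.2 + 1)),
     ("context_before", PySem.List.pyRange (max 0 (se.1 - num_context)) se.1),
     ("context_after", PySem.List.pyRange (se.2 + 1) (min num_snippets (se.2 + 1 + num_context)))])

-- ===== PRECONDITION & SPEC =====
-- Pre_ excludes exactly the inputs where Python A raises KeyError: an entry whose score is
-- above threshold but which has no "paragraph_index" key (B raises there too).
def Pre_group_above_threshold (scores : List (List (String × Int))) (threshold : Int) (num_snippets : Int) (num_context : Int) : Prop :=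
  ∀ e ∈ scores, threshold ≤ pvScore e → (PySem.Dict.mk e).contains "paragraph_index" = true

instance (scores : List (List (String × Int))) (threshold : Int) (num_snippets : Int) (num_context : Int) : Decidable (Pre_group_above_threshold scores threshold num_snippets num_context) := by unfold Pre_group_above_threshold; infer_instance

def pvWitness_group_above_threshold : (List (List (String × Int))) × Int × Int × Int :=
  ([[("paragraph_index", 2), ("score", 5)], [("paragraph_index", 3), ("highlight_score", 1)], [("paragraph_index", 7), ("score", 0)]], 1, 9, 1)

def Spec_group_above_threshold (scores : List (List (String × Int))) (threshold : Int) (num_snippets : Int) (num_context : Int) (out : List (List (String × List Int))) : Prop := out = group_above_threshold_alt scores threshold num_snippets num_context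
instance (scores : List (List (String × Int))) (threshold : Int) (num_snippets : Int) (num_context : Int) (out : List (List (String × List Int))) : Decidable (Spec_group_above_threshold scores threshold num_snippets num_context out) := by unfold Spec_group_above_threshold; infer_instance

-- ===== CLAIM (what is proved, stated in full; the proofs are below) =====
def Claim_equal_group_above_threshold : Prop := ∀ (scores : List (List (String × Int))) (threshold : Int) (num_snippets : Int) (num_context : Int), Dom_group_above_threshold scores threshold num_snippets num_context → Pre_group_above_threshold scores threshold num_snippets num_context → Spec_group_above_threshold scores threshold num_snippets num_context (group_above_threshold scores threshold num_snippets num_context)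

-- ===== LEMMAS AND PROOFS =====

-- runs of consecutive integers, built back to front
def pvInsRun (x : Int) : List (List Int) → List (List Int)
  | [] => [[x]]
  | [] :: rs => [x] :: [] :: rs
  | (y :: r) :: rs => if y = x + 1 then (x :: y :: r) :: rs else [x] :: (y :: r) :: rs

def pvRuns (l : List Int) : List (List Int) := l.foldr pvInsRun []

-- A's "close the current run into runs" step, parametric in the current run
def pvMerge (cur : List Int) : List (List Int) → List (List Int)
  | [] => [cur]
  | [] :: rs => cur :: [] :: rs
  | (y :: r) :: rs => if y = cur.getLast! + 1 then (cur ++ y :: r) :: rs else cur :: (y :: r) :: rs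

theorem pvLast_snoc (l : List Int) (x : Int) : (l ++ [x]).getLast! = x := by
  induction l with
  | nil => rfl
  | cons a l ih => simp [List.getLast!, List.getLast_append] at ih ⊢

theorem pvLast_cons₂ (a b : Int) (l : List Int) : (a :: b :: l).getLast! = (b :: l).getLast! := by
  simp [List.getLast!]

theorem pvInsRun_shape (x : Int) (X : List (List Int)) :
    ∃ r rs, pvInsRun x X = (x :: r) :: rs := by
  match X with
  | [] => exact ⟨[], [], rfl⟩
  | [] :: rs => exact ⟨[], [] :: rs, rfl⟩
  | (y :: r) :: rs =>
    by_cases h : y = x + 1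
    · exact ⟨y :: r, rs, by simp [pvInsRun, h]⟩
    · exact ⟨[], (y :: r) :: rs, by simp [pvInsRun, h]⟩

theorem pvRuns_shape (x : Int) (t : List Int) :
    ∃ r rs, pvRuns (x :: t) = (x :: r) :: rs := by
  have : pvRuns (x :: t) = pvInsRun x (pvRuns t) := rfl
  rw [this]; exact pvInsRun_shape x (pvRuns t)

theorem pvMerge_single (x : Int) (X : List (List Int)) : pvMerge [x] X = pvInsRun x X := by
  match X with
  | [] => rfl
  | [] :: rs => rfl
  | (y :: r) :: rs => simp [pvMerge, pvInsRun, List.getLast!]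

theorem pvMerge_cons (cur : List Int) (y : Int) (r : List Int) (rs : List (List Int)) :
    pvMerge cur ((y :: r) :: rs)
      = if y = cur.getLast! + 1 then (cur ++ y :: r) :: rs else cur :: (y :: r) :: rs := rfl

theorem pvInsRun_cons (x y : Int) (r : List Int) (rs : List (List Int)) :
    pvInsRun x ((y :: r) :: rs)
      = if y = x + 1 then (x :: y :: r) :: rs else [x] :: (y :: r) :: rs := rfl

theorem pvMerge_snoc (cur : List Int) (x : Int) (X : List (List Int)) (h : x = cur.getLast! + 1) :
    pvMerge (cur ++ [x]) X = pvMerge cur (pvInsRun x X) := by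
  match X with
  | [] =>
    show [cur ++ [x]] = pvMerge cur [[x]]
    rw [pvMerge_cons, if_pos h]
  | [] :: rs =>
    show (cur ++ [x]) :: [] :: rs = pvMerge cur ([x] :: [] :: rs)
    rw [pvMerge_cons, if_pos h]
  | (y :: r) :: rs =>
    by_cases h2 : y = x + 1
    · rw [pvInsRun_cons, if_pos h2, pvMerge_cons, if_pos (by rw [pvLast_snoc]; exact h2),
        pvMerge_cons, if_pos h]
      simp
    · rw [pvInsRun_cons, if_neg h2, pvMerge_cons,
        if_neg (by rw [pvLast_snoc]; exact h2), pvMerge_cons, if_pos h]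

-- A's accumulation loop, characterised against pvRuns
theorem pvFoldA (t : List Int) : ∀ (runs : List (List Int)) (cur : List Int),
    (t.foldl (fun (st : List (List Int) × List Int) idx =>
        if idx == st.2.getLast! + 1 then (st.1, st.2 ++ [idx]) else (st.1 ++ [st.2], [idx])) (runs, cur)).1
    ++ [(t.foldl (fun (st : List (List Int) × List Int) idx =>
        if idx == st.2.getLast! + 1 then (st.1, st.2 ++ [idx]) else (st.1 ++ [st.2], [idx])) (runs, cur)).2]
    = runs ++ pvMerge cur (pvRuns t) := by
  induction t with
  | nil => intro runs cur; simp [pvRuns, pvMerge]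
  | cons idx rest ih =>
    intro runs cur
    have hr : pvRuns (idx :: rest) = pvInsRun idx (pvRuns rest) := rfl
    by_cases h : idx = cur.getLast! + 1
    · rw [List.foldl_cons]
      rw [if_pos (beq_iff_eq.mpr h)]
      rw [ih runs (cur ++ [idx])]
      rw [hr, ← pvMerge_snoc cur idx (pvRuns rest) h]
    · rw [List.foldl_cons]
      rw [if_neg (by simp only [beq_iff_eq]; exact h)]
      rw [ih (runs ++ [cur]) [idx]]
      rw [hr, pvMerge_single]
      obtain ⟨r, rs, hsh⟩ := pvInsRun_shape idx (pvRuns rest)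
      rw [hsh, pvMerge_cons, if_neg h]
      simp

-- the main combinatorial fact: on a strictly increasing list, the boundary filters name
-- exactly the heads and lasts of the consecutive runs, and each run is a contiguous range
theorem pvMain (l : List Int) (hl : l.Pairwise (· < ·)) :
    (l.filter (fun x => !decide ((x - 1) ∈ l)) = (pvRuns l).map (·.head!)) ∧
    (l.filter (fun x => !decide ((x + 1) ∈ l)) = (pvRuns l).map (·.getLast!)) ∧
    (∀ r ∈ pvRuns l, r = PySem.List.pyRange r.head! (r.getLast! + 1)) := by
  induction l with
  | nil => exact ⟨rfl, rfl, by intro r hr; cases hr⟩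
  | cons x t ih =>
    have hx : ∀ z ∈ t, x < z := (List.pairwise_cons.mp hl).1
    have ht : t.Pairwise (· < ·) := (List.pairwise_cons.mp hl).2
    obtain ⟨St, Et, Rt⟩ := ih ht
    have hxm1 : (x - 1) ∉ x :: t := by
      intro hmem
      rcases List.mem_cons.mp hmem with h | h
      · omega
      · exact absurd (hx _ h) (by omega)
    cases t with
    | nil =>
      refine ⟨?_, ?_, ?_⟩
      · simp only [pvRuns, List.foldr, pvInsRun]
        rw [List.filter_cons_of_pos (by simpa using hxm1)]
        rfl
      · simp only [pvRuns, List.foldr, pvInsRun]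
        rw [List.filter_cons_of_pos (by simp)]
        rfl
      · intro r hr
        have hr1 : r = [x] := List.mem_singleton.mp hr
        subst hr1
        show [x] = PySem.List.pyRange x (x + 1)
        rw [PySem.List.pyRange_one_cons (by omega), PySem.List.pyRange_one_eq_nil (by omega)]
    | cons y t' =>
      have hxy : x < y := hx y (by simp)
      have hyt : ∀ z ∈ t', y < z := (List.pairwise_cons.mp ht).1
      obtain ⟨r, rs, hsh⟩ := pvRuns_shape y t'
      have hruns : pvRuns (x :: y :: t') = pvInsRun x (pvRuns (y :: t')) := rfl
      -- on the tail t', membership of z-1 / z+1 in x :: y :: t' and in y :: t' agree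
      have hcongS : ∀ z ∈ t', (!decide ((z - 1) ∈ x :: y :: t')) = (!decide ((z - 1) ∈ y :: t')) := by
        intro z hz
        have hz1 : z - 1 ≠ x := by have := hyt z hz; omega
        simp [List.mem_cons, hz1]
      have hcongE : ∀ z ∈ y :: t', (!decide ((z + 1) ∈ x :: y :: t')) = (!decide ((z + 1) ∈ y :: t')) := by
        intro z hz
        have hz1 : z + 1 ≠ x := by
          have : x < z := hx z hz
          omega
        simp [List.mem_cons, hz1]
      by_cases hy : y = x + 1
      · -- x extends the first run of y :: t'
        have hruns' : pvRuns (x :: y :: t') = (x :: y :: r) :: rs := by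
          rw [hruns, hsh, pvInsRun_cons, if_pos hy]
        -- starts
        have hSty : (y :: t').filter (fun z => !decide ((z - 1) ∈ y :: t')) =
            y :: t'.filter (fun z => !decide ((z - 1) ∈ y :: t')) := by
          rw [List.filter_cons_of_pos]
          simp only [Bool.not_eq_eq_eq_not, Bool.not_true, decide_eq_false_iff_not]
          intro hmem
          rcases List.mem_cons.mp hmem with h | h
          · omega
          · exact absurd (hyt _ h) (by omega)
        have hSrs : t'.filter (fun z => !decide ((z - 1) ∈ y :: t')) = rs.map (·.head!) := by
          rw [hSty, hsh] at St
          have St' : y :: t'.filter (fun z => !decide ((z - 1) ∈ y :: t'))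
              = y :: rs.map (·.head!) := by simpa using St
          injection St'
        refine ⟨?_, ?_, ?_⟩
        · rw [hruns']
          rw [List.filter_cons_of_pos (by simpa using hxm1)]
          rw [List.filter_cons_of_neg (by simp [hy])]
          rw [List.filter_congr hcongS, hSrs]
          rfl
        · rw [hruns']
          rw [List.filter_cons_of_neg (by simp [List.mem_cons, hy])]
          rw [List.filter_congr hcongE, Et, hsh]
          simp [pvLast_cons₂]
        · intro q hq
          rw [hruns'] at hq
          rcases List.mem_cons.mp hq with h | h
          · subst h
            have hyr : (y :: r) ∈ pvRuns (y :: t') := by rw [hsh]; exact List.mem_cons_self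
            have hran := Rt (y :: r) hyr
            have hhead : (y :: r).head! = y := rfl
            rw [hhead] at hran
            have hyL : y < (y :: r).getLast! + 1 := by
              have : y ∈ PySem.List.pyRange y ((y :: r).getLast! + 1) := by
                rw [← hran]; exact List.mem_cons_self
              exact (PySem.List.mem_pyRange_one.mp this).2
            show x :: y :: r = PySem.List.pyRange (x :: y :: r).head! ((x :: y :: r).getLast! + 1)
            have hh : (x :: y :: r).head! = x := rfl
            rw [hh, pvLast_cons₂]
            rw [PySem.List.pyRange_one_cons (by omega)]
            rw [show x + 1 = y from hy.symm, ← hran]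
          · exact Rt q (by rw [hsh]; exact List.mem_cons_of_mem _ h)
      · -- x opens a run of its own
        have hxp1 : (x + 1) ∉ x :: y :: t' := by
          intro hmem
          rcases List.mem_cons.mp hmem with h | h
          · omega
          · rcases List.mem_cons.mp h with h2 | h2
            · exact hy (by omega)
            · have := hyt _ h2; omega
        have hruns' : pvRuns (x :: y :: t') = [x] :: (y :: r) :: rs := by
          rw [hruns, hsh, pvInsRun_cons, if_neg hy]
        have hcongS' : ∀ z ∈ y :: t', (!decide ((z - 1) ∈ x :: y :: t')) = (!decide ((z - 1) ∈ y :: t')) := by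
          intro z hz
          have hz1 : z - 1 ≠ x := by
            intro hzx
            apply hxp1
            have hzz : x + 1 = z := by omega
            rw [hzz]
            exact List.mem_cons_of_mem _ hz
          simp [List.mem_cons, hz1]
        refine ⟨?_, ?_, ?_⟩
        · rw [hruns']
          rw [List.filter_cons_of_pos (by simpa using hxm1)]
          rw [List.filter_congr hcongS', St, hsh]
          rfl
        · rw [hruns']
          rw [List.filter_cons_of_pos (by simpa using hxp1)]
          rw [List.filter_congr hcongE, Et, hsh]
          rfl
        · intro q hq
          rw [hruns'] at hq
          rcases List.mem_cons.mp hq with h | h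
          · subst h
            show [x] = PySem.List.pyRange x (x + 1)
            rw [PySem.List.pyRange_one_cons (by omega), PySem.List.pyRange_one_eq_nil (by omega)]
          · exact Rt q (by rw [hsh]; exact h)

-- the two ports compute the same above-threshold set
theorem pvSetEq (scores : List (List (String × Int))) (threshold : Int) :
    scores.foldl (fun s e => if threshold ≤ pvScore e then PySem.Set.add s (pvIdx e) else s) PySem.Set.empty
      = PySem.Set.ofList ((scores.filter (fun e => decide (threshold ≤ pvScore e))).map pvIdx) := by
  rw [PySem.List.foldl_ite_eq_foldl_filter (fun e => threshold ≤ pvScore e)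
    (fun s e => PySem.Set.add s (pvIdx e))]
  rw [PySem.Set.ofList_eq_foldl, List.foldl_map]
  rfl

-- ===== VERDICT (by name: the statement is the Claim_ definition above) =====
theorem group_above_threshold_spec : Claim_equal_group_above_threshold := by
  intro scores threshold num_snippets num_context _hdom _hpre
  unfold Spec_group_above_threshold
  unfold group_above_threshold group_above_threshold_alt
  simp only [pvSetEq scores threshold]
  set S : PySem.Set Int :=
    PySem.Set.ofList ((scores.filter (fun e => decide (threshold ≤ pvScore e))).map pvIdx) with hSdef
  set L := PySem.List.sorted S (fun x => x) with hLdef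
  have hLpw : L.Pairwise (· < ·) := by
    rw [hLdef, hSdef]; exact PySem.List.sorted_ofList_pairwise_lt _
  have hLperm : L.Perm S := PySem.List.sorted_perm S _ _
  have hcontains : ∀ z : Int, PySem.Set.contains S z = decide (z ∈ L) := by
    intro z
    show List.contains S z = decide (z ∈ L)
    rcases Classical.em (z ∈ L) with h | h
    · simp only [h, decide_true]
      exact List.contains_iff_mem.mpr (hLperm.mem_iff.mp h)
    · simp only [h, decide_false]
      rw [Bool.eq_false_iff]
      intro hm
      exact h (hLperm.mem_iff.mpr (List.contains_iff_mem.mp hm))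
  have hstarts : PySem.List.sorted (List.filter (fun x => !(PySem.Set.contains S (x - 1))) S) (fun x => x)
      = L.filter (fun x => !decide ((x - 1) ∈ L)) := by
    apply PySem.List.sorted_eq_of_perm_of_pairwise_lt
    · have h2 : L.filter (fun x => !(PySem.Set.contains S (x - 1)))
          = L.filter (fun x => !decide ((x - 1) ∈ L)) :=
        List.filter_congr (by intro z _; rw [hcontains])
      rw [← h2]
      exact hLperm.filter _
    · exact hLpw.filter _
  have hends : PySem.List.sorted (List.filter (fun x => !(PySem.Set.contains S (x + 1))) S) (fun x => x)
      = L.filter (fun x => !decide ((x + 1) ∈ L)) := by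
    apply PySem.List.sorted_eq_of_perm_of_pairwise_lt
    · have h2 : L.filter (fun x => !(PySem.Set.contains S (x + 1)))
          = L.filter (fun x => !decide ((x + 1) ∈ L)) :=
        List.filter_congr (by intro z _; rw [hcontains])
      rw [← h2]
      exact hLperm.filter _
    · exact hLpw.filter _
  obtain ⟨hSt, hEn, hRan⟩ := pvMain L hLpw
  rw [hstarts, hends, hSt, hEn, List.zip_map', List.map_map]
  clear hstarts hends hSt hEn hcontains hLperm
  clear_value L
  clear hLdef
  cases L with
  | nil => rfl
  | cons h t =>
    dsimp only
    have hfold := pvFoldA t [] [h]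
    rw [PySem.List.foldl_append_singleton_eq_map
      (f := fun run : List Int =>
        [("candidate_indices", run),
         ("context_before", PySem.List.pyRange (max 0 (run.head! - num_context)) run.head!),
         ("context_after", PySem.List.pyRange (run.getLast! + 1) (min num_snippets (run.getLast! + 1 + num_context)))])]
    rw [show ((t.foldl (fun (st : List (List Int) × List Int) idx =>
          if idx == st.2.getLast! + 1 then (st.1, st.2 ++ [idx]) else (st.1 ++ [st.2], [idx])) ([], [h])).1
        ++ [(t.foldl (fun (st : List (List Int) × List Int) idx =>
          if idx == st.2.getLast! + 1 then (st.1, st.2 ++ [idx]) else (st.1 ++ [st.2], [idx])) ([], [h])).2])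
        = pvRuns (h :: t) from by
      rw [hfold, pvMerge_single]; rfl]
    rw [List.nil_append]
    apply List.map_congr_left
    intro r hr
    have hrr := (hRan r hr).symm
    simp only [Function.comp]
    rw [hrr]
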